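-- pv_equiv track=rewrite | github.com/solofruad/traffic-accidents | model/classes/tweet2accident/ner_extractor.py | get_entities
-- ===== SOURCE A (Python) =====
-- def get_entities(ents):
--     entities = []
--     entity = ''
--     tokens = []
--     for e in range(len(ents)):
--         token = ents[e][0]
--         ner = ents[e][1]
--         ner_iob = ner.split("-")[0]
--         ner_text = ner.split("-")[1]
--
--         if (ner_iob == 'B' and len(tokens) > 0):
--             t = ' '.join(tokens)
--             entities.append((t,entity))
--             tokens = []
--
--         entity = ner_text
--         tokens.append(token)
--         if e == len(ents)-1:
--             t = ' '.join(tokens)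
--             entities.append((t,entity))
--
--
--     return entities
-- ===== SOURCE B (Python) =====
-- def get_entities(ents):
--     # Parse every tag up front (index [1] raises IndexError for dash-less tags,
--     # in the same left-to-right order as the original), then split the parsed
--     # list into spans recursively: each span is a leading token plus the run of
--     # following non-'B' tokens; its label is the last token's tag text.
--     parsed = [(token, ner.split("-")[0], ner.split("-")[1]) for token, ner in ents]
--
--     def spans(items):
--         if not items:
--             return []
--         group = [items[0]]
--         i = 1
--         while i < len(items) and items[i][1] != 'B':
--             group.append(items[i])
--             i += 1
--         return [(' '.join(tok for tok, _, _ in group), group[-1][2])] + spans(items[i:])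
--
--     return spans(parsed)
-- ===== Notes on version B (the rewrite author's own statement) =====
-- stated objective: idiomatic
-- what changed: A threads a mutable (entities, entity, tokens) accumulator through one indexed loop with a last-index flush; B parses all tags up front and then splits the parsed list into spans by structural recursion (leading token + run of following non-B tokens), with no accumulator state and no index arithmetic.
-- outside the precondition, e.g. on get_entities([('car', 'B')]): A raises IndexError, B raises IndexError
import Mathlib
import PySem

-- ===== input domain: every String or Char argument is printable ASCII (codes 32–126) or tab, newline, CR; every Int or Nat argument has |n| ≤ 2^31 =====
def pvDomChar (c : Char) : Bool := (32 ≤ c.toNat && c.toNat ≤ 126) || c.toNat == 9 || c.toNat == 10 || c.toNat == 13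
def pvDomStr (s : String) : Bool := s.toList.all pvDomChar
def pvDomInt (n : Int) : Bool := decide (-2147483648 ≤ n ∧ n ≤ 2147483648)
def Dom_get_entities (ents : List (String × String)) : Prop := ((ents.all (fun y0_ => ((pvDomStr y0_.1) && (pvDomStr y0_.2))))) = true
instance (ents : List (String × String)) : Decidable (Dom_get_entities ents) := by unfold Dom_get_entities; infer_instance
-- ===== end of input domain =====

-- B re-decomposes A's single-pass accumulator loop as: parse all tags up front,
-- then split the parsed list into spans by recursion on the structure (idiomatic; same cost).


-- ===== PORT A =====
-- one iteration of A's for-loop; state = (entities, entity, tokens), n = len(ents)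
def pvStepA (n : Int) (st : List (String × String) × String × List String)
    (ep : Int × String × String) : List (String × String) × String × List String :=
  let token := ep.2.1
  let ner := ep.2.2
  let ner_iob := (PySem.List.pyGet? ((PySem.Str.split? ner "-").getD []) 0).getD ""
  let ner_text := (PySem.List.pyGet? ((PySem.Str.split? ner "-").getD []) 1).getD ""
  let st1 := if ner_iob = "B" ∧ st.2.2.length > 0
             then (st.1 ++ [(PySem.Str.join " " st.2.2, st.2.1)], ([] : List String))
             else (st.1, st.2.2)
  let tokens := st1.2 ++ [token]
  let entities := if ep.1 = n - 1 then st1.1 ++ [(PySem.Str.join " " tokens, ner_text)] else st1.1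
  (entities, ner_text, tokens)

def get_entities (ents : List (String × String)) : List (String × String) :=
  ((PySem.List.enumerate ents 0).foldl (pvStepA ents.length) ([], "", [])).1

-- ===== PORT B =====
-- (token, ner) ↦ (token, ner.split("-")[0], ner.split("-")[1])
def pvParseB (p : String × String) : String × String × String :=
  (p.1, (PySem.List.pyGet? ((PySem.Str.split? p.2 "-").getD []) 0).getD "",
        (PySem.List.pyGet? ((PySem.Str.split? p.2 "-").getD []) 1).getD "")

-- recursive span splitter: first item plus the run of following non-'B' items, then recurse
def pvSpans : List (String × String × String) → List (String × String)
  | [] => []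
  | x :: rest =>
    let grp := x :: rest.takeWhile (fun y => y.2.1 != "B")
    (PySem.Str.join " " (grp.map (·.1)), (grp.getLastD ("", "", "")).2.2)
      :: pvSpans (rest.dropWhile (fun y => y.2.1 != "B"))
termination_by l => l.length
decreasing_by
  simp only [List.length_cons]
  exact Nat.lt_succ_of_le (List.length_dropWhile_le _ _)

def get_entities_alt (ents : List (String × String)) : List (String × String) :=
  pvSpans (ents.map pvParseB)

-- ===== PRECONDITION & SPEC =====
-- Pre_ excludes exactly the inputs where some tag has no '-': there Python A raises
-- IndexError on ner.split("-")[1] (and B raises the same way).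
def Pre_get_entities (ents : List (String × String)) : Prop :=
  ∀ p ∈ ents, '-' ∈ p.2.toList
instance (ents : List (String × String)) : Decidable (Pre_get_entities ents) := by
  unfold Pre_get_entities; infer_instance

def pvWitness_get_entities : (List (String × String)) :=
  [("crash", "B-LOC"), ("on", "I-LOC"), ("5th", "B-PER")]

def Spec_get_entities (ents : List (String × String)) (out : List (String × String)) : Prop := out = get_entities_alt ents
instance (ents : List (String × String)) (out : List (String × String)) : Decidable (Spec_get_entities ents out) := by unfold Spec_get_entities; infer_instance

-- ===== CLAIM (what is proved, stated in full; the proofs are below) =====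
def Claim_equal_get_entities : Prop := ∀ (ents : List (String × String)), Dom_get_entities ents → Pre_get_entities ents → Spec_get_entities ents (get_entities ents)

-- ===== LEMMAS AND PROOFS =====

-- A's loop, rephrased recursively on the remaining input (proof-only helper)
def pvProcA : List String → String → List (String × String) → List (String × String)
  | _, _, [] => []
  | tokens, entity, (token, ner) :: rest =>
    let iob := (PySem.List.pyGet? ((PySem.Str.split? ner "-").getD []) 0).getD ""
    let text := (PySem.List.pyGet? ((PySem.Str.split? ner "-").getD []) 1).getD ""
    let flush := iob = "B" ∧ tokens.length > 0
    let pre := if flush then [(PySem.Str.join " " tokens, entity)] else []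
    let tokens' := (if flush then ([] : List String) else tokens) ++ [token]
    pre ++ (match rest with
            | [] => [(PySem.Str.join " " tokens', text)]
            | _ :: _ => pvProcA tokens' text rest)

-- B's span splitter with an explicit open group (proof-only helper)
def pvSpansGo : List (String × String × String) → List (String × String × String) → List (String × String)
  | grp, [] => [(PySem.Str.join " " (grp.map (·.1)), (grp.getLastD ("", "", "")).2.2)]
  | grp, y :: rest =>
    if y.2.1 = "B" then
      (PySem.Str.join " " (grp.map (·.1)), (grp.getLastD ("", "", "")).2.2) :: pvSpansGo [y] rest
    else pvSpansGo (grp ++ [y]) rest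

lemma pvA_loop (n : Int) (l : List (String × String)) : ∀ (i : Int) (acc : List (String × String))
    (entity : String) (tokens : List String), i + l.length = n →
    ((PySem.List.enumerate l i).foldl (pvStepA n) (acc, entity, tokens)).1
      = acc ++ pvProcA tokens entity l := by
  induction l with
  | nil => intro i acc entity tokens h; simp [PySem.List.enumerate_nil, pvProcA]
  | cons p l ih =>
    intro i acc entity tokens h
    obtain ⟨token, ner⟩ := p
    rw [PySem.List.enumerate_cons, List.foldl_cons]
    simp only [List.length_cons] at h
    by_cases hl : l = []
    · subst hl
      have hi : i = n - 1 := by simp at h; omega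
      simp only [PySem.List.enumerate_nil, List.foldl_nil, pvStepA, pvProcA, hi, if_pos]
      by_cases hf : (PySem.List.pyGet? ((PySem.Str.split? ner "-").getD []) 0).getD "" = "B"
              ∧ tokens.length > 0
      · simp [hf]
      · simp [hf]
    · have hi : ¬ (i = n - 1) := by
        have : 0 < l.length := List.length_pos_iff.mpr hl
        omega
      have h' : (i + 1) + l.length = n := by omega
      obtain ⟨q, l', rfl⟩ := List.exists_cons_of_ne_nil hl
      rw [pvProcA]
      by_cases hf : (PySem.List.pyGet? ((PySem.Str.split? ner "-").getD []) 0).getD "" = "B"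
              ∧ tokens.length > 0
      · simp only [pvStepA, hf, hi, if_false]
        rw [ih (i+1) _ _ _ h']
        simp [List.append_assoc]
      · simp only [pvStepA]
        rw [ih (i+1) _ _ _ h']
        simp [hf, hi]

lemma pvGo_spans (rem : List (String × String × String)) : ∀ grp, grp ≠ [] →
    pvSpansGo grp rem
      = (PySem.Str.join " " ((grp ++ rem.takeWhile (fun y => y.2.1 != "B")).map (·.1)),
         ((grp ++ rem.takeWhile (fun y => y.2.1 != "B")).getLastD ("", "", "")).2.2)
        :: pvSpans (rem.dropWhile (fun y => y.2.1 != "B")) := by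
  induction rem with
  | nil => intro grp h; simp [pvSpansGo, pvSpans]
  | cons y rest ih =>
    intro grp h
    by_cases hB : y.2.1 = "B"
    · rw [pvSpansGo, if_pos hB]
      rw [ih [y] (by simp)]
      simp [hB, pvSpans]
    · rw [pvSpansGo, if_neg hB]
      rw [ih (grp ++ [y]) (by simp)]
      simp [hB]

lemma pvProcA_go (rest : List (String × String)) : ∀ (x : String × String)
    (grp : List (String × String × String)), grp ≠ [] →
    pvProcA (grp.map (·.1)) ((grp.getLastD ("", "", "")).2.2) (x :: rest)
      = pvSpansGo grp (pvParseB x :: rest.map pvParseB) := by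
  induction rest with
  | nil =>
    intro x grp h
    by_cases hB : (PySem.List.pyGet? ((PySem.Str.split? x.2 "-").getD []) 0).getD "" = "B"
    · simp [pvProcA, pvSpansGo, pvParseB, hB, h, List.length_pos_iff]
    · simp [pvProcA, pvSpansGo, pvParseB, hB]
  | cons y rs ih =>
    intro x grp h
    by_cases hB : (PySem.List.pyGet? ((PySem.Str.split? x.2 "-").getD []) 0).getD "" = "B"
    · have := ih y [pvParseB x] (by simp)
      rw [pvProcA, pvSpansGo]
      simp [pvParseB, hB, h, List.length_pos_iff]
      simpa [pvParseB, hB] using this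
    · have := ih y (grp ++ [pvParseB x]) (by simp)
      rw [pvProcA, pvSpansGo]
      simp [pvParseB, hB]
      simpa [pvParseB, List.getLastD_concat] using this

-- ===== VERDICT (by name: the statement is the Claim_ definition above) =====
theorem get_entities_spec : Claim_equal_get_entities := by
  intro ents _ _
  show get_entities ents = get_entities_alt ents
  match ents with
  | [] => simp [get_entities, get_entities_alt, PySem.List.enumerate_nil, pvSpans]
  | x :: rest =>
    rw [get_entities, pvA_loop ((x :: rest).length : Int) (x :: rest) 0 [] "" [] (by simp)]
    rw [List.nil_append]
    match rest with
    | [] =>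
      simp [pvProcA, get_entities_alt, pvSpans, pvParseB]
    | y :: rs =>
      rw [pvProcA]
      have h1 := pvProcA_go rs y [pvParseB x] (by simp)
      simp only [pvParseB, List.map_cons, List.map_nil, List.getLastD, List.getLast_singleton] at h1
      simp only [List.length_nil, gt_iff_lt, lt_irrefl, and_false, if_false, List.nil_append]
      rw [h1, pvGo_spans _ _ (by simp)]
      rw [get_entities_alt, List.map_cons, pvSpans]
      simp [pvParseB]
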